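-- pv_equiv track=rewrite | github.com/1999medbidlal/Python_Module | python_module_10/ex4/decorator_mastery.py | validate_mage_name
-- ===== SOURCE A (Python) =====
-- def validate_mage_name(name: str) -> bool:
--     i = 0
--     j = 0
--     for c in name:
--         if ((c >= 'a' and c <= 'z') or (c >= 'A' and c <= 'Z')
--                 or c == ' '):
--             j += 1
--         else:
--             i += 1
--     if i > 0:
--         return False
--     elif j < 3:
--         return False
--     else:
--         return True
-- ===== SOURCE B (Python) =====
-- import re
--
-- _NAME_RE = re.compile(r'[a-zA-Z ]{3,}')
--
-- def validate_mage_name(name: str) -> bool: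
--     return bool(_NAME_RE.fullmatch(name))
-- ===== Notes on version B (the rewrite author's own statement) =====
-- stated objective: idiomatic
-- what changed: Replaced the manual per-character counting loop with a single precompiled regex fullmatch on [a-zA-Z ]{3,}.
import Mathlib
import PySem

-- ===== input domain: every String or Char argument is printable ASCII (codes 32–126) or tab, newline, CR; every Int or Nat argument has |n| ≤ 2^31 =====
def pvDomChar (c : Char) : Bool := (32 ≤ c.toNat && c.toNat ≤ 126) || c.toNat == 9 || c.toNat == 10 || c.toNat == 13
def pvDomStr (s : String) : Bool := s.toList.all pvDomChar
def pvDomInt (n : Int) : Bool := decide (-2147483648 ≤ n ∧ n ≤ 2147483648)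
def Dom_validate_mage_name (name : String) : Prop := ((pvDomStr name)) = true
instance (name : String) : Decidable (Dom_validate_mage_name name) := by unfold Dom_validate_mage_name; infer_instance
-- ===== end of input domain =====

-- B replaces A's manual character-counting loop with a single regex fullmatch
-- on [a-zA-Z ]{3,} (ported as: every char in the class, and length ≥ 3).


-- ===== PORT A =====
-- the loop's two counters: i = invalid chars, j = valid chars
-- the loop-body condition of A, as written in the Python source
def pvCondA (c : Char) : Bool := ('a' ≤ c && c ≤ 'z') || ('A' ≤ c && c ≤ 'Z') || c == ' '

def validate_mage_name (name : String) : Bool :=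
  let p : Int × Int := name.toList.foldl
    (fun (st : Int × Int) (c : Char) =>
      if pvCondA c then (st.1, st.2 + 1) else (st.1 + 1, st.2)) (0, 0)
  if p.1 > 0 then false
  else if p.2 < 3 then false
  else true

-- ===== PORT B =====
-- the regex character class [a-zA-Z ]
def pvNameChar (c : Char) : Bool := ('a' ≤ c && c ≤ 'z') || ('A' ≤ c && c ≤ 'Z') || c == ' '

-- re.fullmatch(r'[a-zA-Z ]{3,}', name): every char in the class and length ≥ 3
def validate_mage_name_alt (name : String) : Bool :=
  name.toList.all pvNameChar && decide (3 ≤ name.toList.length)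

-- ===== PRECONDITION & SPEC =====
def Spec_validate_mage_name (name : String) (out : Bool) : Prop := out = validate_mage_name_alt name
instance (name : String) (out : Bool) : Decidable (Spec_validate_mage_name name out) := by unfold Spec_validate_mage_name; infer_instance

-- ===== CLAIM (what is proved, stated in full; the proofs are below) =====
def Claim_equal_validate_mage_name : Prop := ∀ (name : String), Dom_validate_mage_name name → Spec_validate_mage_name name (validate_mage_name name)

-- ===== LEMMAS AND PROOFS =====

-- A's fold adds the number of invalid / valid characters to the accumulators
theorem pv_fold_counts (l : List Char) (i j : Int) :
    l.foldl (fun (st : Int × Int) (c : Char) =>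
      if pvCondA c then (st.1, st.2 + 1) else (st.1 + 1, st.2)) (i, j)
    = (i + (l.countP (fun c => !pvCondA c) : Int), j + (l.countP pvCondA : Int)) := by
  induction l generalizing i j with
  | nil => simp
  | cons c t ih =>
    simp only [List.foldl_cons, List.countP_cons]
    by_cases h : pvCondA c = true
    · rw [if_pos h, ih]
      simp [h]
      ring
    · rw [if_neg h, ih]
      simp [h]
      ring

-- ===== VERDICT (by name: the statement is the Claim_ definition above) =====
theorem validate_mage_name_spec : Claim_equal_validate_mage_name := by
  intro name _
  show validate_mage_name name = validate_mage_name_alt name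
  unfold validate_mage_name validate_mage_name_alt
  rw [pv_fold_counts]
  have hAB : pvCondA = pvNameChar := rfl
  rw [hAB]
  have hsum : name.toList.countP pvNameChar + name.toList.countP (fun c => !pvNameChar c) = name.toList.length := by
    have h := List.length_eq_countP_add_countP (p := pvNameChar) (l := name.toList)
    have hp : (fun a => decide ¬pvNameChar a = true) = (fun c => !pvNameChar c) := by
      funext c; cases pvNameChar c <;> simp
    rw [hp] at h
    omega
  have hall : name.toList.all pvNameChar = decide (name.toList.countP (fun c => !pvNameChar c) = 0) := by
    induction name.toList with
    | nil => simp
    | cons c t ih =>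
      by_cases h : pvNameChar c = true <;> simp [h, ih]
  rw [hall]
  by_cases h0 : name.toList.countP (fun c => !pvNameChar c) = 0
  · have hlen : name.toList.countP pvNameChar = name.toList.length := by omega
    simp only [h0, hlen]
    split_ifs with h1 h2 <;> simp_all
  · have hpos : (0:Int) < (name.toList.countP (fun c => !pvNameChar c) : Int) := by
      have : 0 < name.toList.countP (fun c => !pvNameChar c) := Nat.pos_of_ne_zero h0
      exact_mod_cast this
    simp only [h0]
    split_ifs with h1 <;> simp_all
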